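-- pv_equiv track=rewrite | github.com/curtisbright/Delisle-MOLS | equivalence-check.py | to_mols
-- ===== SOURCE A (Python) =====
-- n = 10
--
-- def to_mols(l):
-- 	LA = [[-1 for j in range(n)] for i in range(n)]
-- 	LB = [[-1 for j in range(n)] for i in range(n)]
-- 	for i in range(n):
-- 		for j in range(n):
-- 			for k in range(n):
-- 				if 4*n*(i*n+j)+2*n+k+1 in l:
-- 					LA[i][j] = k
-- 				if 4*n*(i*n+j)+3*n+k+1 in l:
-- 					LB[i][j] = k
--
-- 	return(LA, LB)
-- ===== SOURCE B (Python) =====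
-- n = 10
--
-- def to_mols(l):
--     LA = [[-1] * n for _ in range(n)]
--     LB = [[-1] * n for _ in range(n)]
--     for v in l:
--         m = v - 1
--         cell = m // (4 * n)
--         pos = m % (4 * n)
--         i = cell // n
--         j = cell % n
--         if 0 <= i < n:
--             if 2 * n <= pos < 3 * n:
--                 LA[i][j] = max(LA[i][j], pos - 2 * n)
--             elif 3 * n <= pos:
--                 LB[i][j] = max(LB[i][j], pos - 3 * n)
--     return (LA, LB)
-- ===== Notes on version B (the rewrite author's own statement) =====
-- stated objective: faster
-- what changed: A scans l with a membership test for each of the 2000 (cell,symbol) codes; B makes a single pass over l, decoding each element arithmetically into (cell, band, symbol) and keeping the maximum symbol per cell, which matches A's last-k-wins over ascending k.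
import Mathlib
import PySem

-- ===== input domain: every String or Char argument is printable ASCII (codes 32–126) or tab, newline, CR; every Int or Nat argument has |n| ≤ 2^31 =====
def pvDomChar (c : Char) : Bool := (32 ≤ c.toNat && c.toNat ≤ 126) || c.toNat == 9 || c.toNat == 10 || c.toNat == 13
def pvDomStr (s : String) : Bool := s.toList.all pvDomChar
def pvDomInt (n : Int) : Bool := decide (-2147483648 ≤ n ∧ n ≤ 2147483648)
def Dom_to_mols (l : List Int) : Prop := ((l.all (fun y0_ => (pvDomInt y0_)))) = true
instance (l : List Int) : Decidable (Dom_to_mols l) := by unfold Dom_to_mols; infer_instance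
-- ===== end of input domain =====

-- B replaces A's 2000 membership scans of l (for every cell and symbol) by ONE pass over l
-- that decodes each element arithmetically; same return value, no observable mutation.

-- ===== PORT A =====
-- LA[i][j] = x  on a grid (indices are in range at every use site, so toNat/set/getD are exact)
def pvSetCell (g : List (List Int)) (i j : Nat) (x : Int) : List (List Int) :=
  g.set i ((g.getD i []).set j x)

-- body of A's innermost loop: the two 'if … in l' assignments, state = (LA, LB)
def pvAStep (l : List Int) (i j : Int)
    (st : List (List Int) × List (List Int)) (k : Int) :
    List (List Int) × List (List Int) :=
  let st1 := if 4*10*(i*10+j)+2*10+k+1 ∈ l then (pvSetCell st.1 i.toNat j.toNat k, st.2) else st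
  if 4*10*(i*10+j)+3*10+k+1 ∈ l then (st1.1, pvSetCell st1.2 i.toNat j.toNat k) else st1

def to_mols (l : List Int) : List (List Int) × List (List Int) :=
  let rng := PySem.List.pyRange 0 10 1
  let LA := rng.map (fun _ => rng.map (fun _ => (-1 : Int)))
  let LB := rng.map (fun _ => rng.map (fun _ => (-1 : Int)))
  rng.foldl (fun st i => rng.foldl (fun st j => (PySem.List.pyRange 0 10 1).foldl (pvAStep l i j) st) st) (LA, LB)

-- ===== PORT B =====
-- LA[i][j] read (indices in range at every use site)
def pvGetCell (g : List (List Int)) (i j : Nat) : Int := (g.getD i []).getD j 0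

-- body of B's single loop over l: decode v, update at most one cell with max
def pvAltStep (st : List (List Int) × List (List Int)) (v : Int) :
    List (List Int) × List (List Int) :=
  let m := v - 1
  let cell := PySem.Int.floordiv m (4*10)
  let pos := PySem.Int.mod m (4*10)
  let i := PySem.Int.floordiv cell 10
  let j := PySem.Int.mod cell 10
  if 0 ≤ i ∧ i < 10 then
    if 2*10 ≤ pos ∧ pos < 3*10 then
      (pvSetCell st.1 i.toNat j.toNat (max (pvGetCell st.1 i.toNat j.toNat) (pos - 2*10)), st.2)
    else if 3*10 ≤ pos then
      (st.1, pvSetCell st.2 i.toNat j.toNat (max (pvGetCell st.2 i.toNat j.toNat) (pos - 3*10)))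
    else st
  else st

def to_mols_alt (l : List Int) : List (List Int) × List (List Int) :=
  l.foldl pvAltStep
    (List.replicate 10 (List.replicate 10 (-1 : Int)),
     List.replicate 10 (List.replicate 10 (-1 : Int)))

-- ===== PRECONDITION & SPEC =====
def Spec_to_mols (l : List Int) (out : List (List Int) × List (List Int)) : Prop := out = to_mols_alt l
instance (l : List Int) (out : List (List Int) × List (List Int)) : Decidable (Spec_to_mols l out) := by unfold Spec_to_mols; infer_instance

-- ===== CLAIM (what is proved, stated in full; the proofs are below) =====
def Claim_equal_to_mols : Prop := ∀ (l : List Int), Dom_to_mols l → Spec_to_mols l (to_mols l)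

-- ===== LEMMAS AND PROOFS =====

-- a 10×10 grid as the tabulation of a function
def pvTab (f : Nat → Nat → Int) : List (List Int) :=
  (List.range 10).map fun i => (List.range 10).map fun j => f i j

def pvKs : List Int := [0,1,2,3,4,5,6,7,8,9]

-- first code of the band c (c = 2*10 resp. 3*10) at cell (i,j)
def pvBase (c : Int) (i j : Nat) : Int := 4*10*((i : Int)*10+(j : Int))+c+1

-- "keep the hit" fold (A's per-cell shape) and "max of hits" fold
def pvFI (p : Int → Bool) (a : Int) (ks : List Int) : Int :=
  ks.foldl (fun acc k => if p k then k else acc) a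
def pvFM (p : Int → Bool) (a : Int) (ks : List Int) : Int :=
  ks.foldl (fun acc k => if p k then max acc k else acc) a

-- B's per-cell step and fold
def pvStepCell (c : Int) (i j : Nat) (a v : Int) : Int :=
  if 0 ≤ v - pvBase c i j ∧ v - pvBase c i j < 10 then max a (v - pvBase c i j) else a
def pvFB (c : Int) (i j : Nat) (a : Int) (l : List Int) : Int :=
  l.foldl (pvStepCell c i j) a

theorem pvTab_congr {f f' : Nat → Nat → Int}
    (h : ∀ i j, i < 10 → j < 10 → f i j = f' i j) : pvTab f = pvTab f' := by
  unfold pvTab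
  refine List.map_congr_left (fun i hi => ?_)
  refine List.map_congr_left (fun j hj => ?_)
  exact h i j (List.mem_range.mp hi) (List.mem_range.mp hj)

theorem pvGetCell_tab (f : Nat → Nat → Int) (i j : Nat) (hi : i < 10) (hj : j < 10) :
    pvGetCell (pvTab f) i j = f i j := by
  simp [pvGetCell, pvTab, List.getD_eq_getElem?_getD, hi, hj]

theorem pvSetCell_tab (f : Nat → Nat → Int) (i0 j0 : Nat) (hi : i0 < 10) (hj : j0 < 10) (x : Int) :
    pvSetCell (pvTab f) i0 j0 x = pvTab (fun i j => if i = i0 ∧ j = j0 then x else f i j) := by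
  unfold pvSetCell pvTab
  apply List.ext_getElem
  · simp
  · intro i h1 h2
    have hi10 : i < 10 := by simpa using h2
    by_cases hii : i = i0
    · subst hii
      simp [List.getD_eq_getElem?_getD, hi, List.getElem_set]
      apply List.ext_getElem
      · simp
      · intro j h3 h4
        have hj10 : j < 10 := by simpa using h4
        by_cases hjj : j = j0 <;> simp [List.getElem_set, hjj]
        exact fun h => absurd h.symm hjj
    · simp [List.getElem_set, hii, hi10, Ne.symm hii]

theorem pvFM_false {p : Int → Bool} {a : Int} {ks : List Int}
    (h : ∀ k ∈ ks, p k = false) : pvFM p a ks = a := by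
  induction ks generalizing a with
  | nil => rfl
  | cons k ks ih =>
    have hk := h k (by simp)
    simp only [pvFM, List.foldl_cons, hk, Bool.false_eq_true, if_false] at *
    exact ih (fun k hk => h k (by simp [hk]))

theorem pvFM_congr {p q : Int → Bool} (h : ∀ k, p k = q k) (a : Int) (ks : List Int) :
    pvFM p a ks = pvFM q a ks := by
  have : p = q := funext h
  rw [this]

theorem pvFM_max (p : Int → Bool) (a b : Int) (ks : List Int) :
    pvFM p (max a b) ks = max (pvFM p a ks) b := by
  induction ks generalizing a with
  | nil => rfl
  | cons k ks ih =>
    by_cases hp : p k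
    · simp only [pvFM, List.foldl_cons, hp, if_true] at *
      rw [show max (max a b) k = max (max a k) b by omega]
      exact ih _
    · simp only [pvFM, List.foldl_cons, hp, Bool.false_eq_true, if_false] at *
      exact ih _

theorem pvFM_merge (p q : Int → Bool) (a : Int) (ks : List Int) :
    pvFM (fun k => p k || q k) a ks = pvFM p (pvFM q a ks) ks := by
  induction ks generalizing a with
  | nil => rfl
  | cons k ks ih =>
    have step : ∀ (r : Int → Bool) (a : Int),
        pvFM r a (k :: ks) = pvFM r (if r k then max a k else a) ks := fun r a => rfl
    by_cases hp : p k <;> by_cases hq : q k <;>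
      simp only [step, hp, hq, Bool.true_or, Bool.false_or, Bool.or_false, Bool.or_true,
        if_true, Bool.false_eq_true, if_false] <;> rw [ih]
    · have h1 : max (pvFM q (max a k) ks) k = pvFM q (max (max a k) k) ks := (pvFM_max q (max a k) k ks).symm
      rw [h1, show max (max a k) k = max a k by omega]
    · rw [pvFM_max q a k ks]

theorem pvFM_single (c v a : Int) (ks : List Int) :
    pvFM (fun k => decide (c + k = v)) a ks = if (v - c) ∈ ks then max a (v - c) else a := by
  induction ks generalizing a with
  | nil => rfl
  | cons k ks ih =>
    have step : pvFM (fun x => decide (c + x = v)) a (k :: ks)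
        = pvFM (fun x => decide (c + x = v)) (if c + k = v then max a k else a) ks := by
      simp only [pvFM, List.foldl_cons, decide_eq_true_eq]
    rw [step, ih]
    by_cases hk : c + k = v
    · have hkv : k = v - c := by omega
      subst hkv
      by_cases hm : (v - c) ∈ ks <;>
        simp [hm, hk, show max (max a (v - c)) (v - c) = max a (v - c) by omega]
    · have hkv : ¬ (v - c = k) := by omega
      simp [hk, List.mem_cons, hkv]

theorem pvFI_eq_FM (p : Int → Bool) : ∀ (ks : List Int) (a : Int),
    List.Pairwise (· ≤ ·) ks → (∀ k ∈ ks, a ≤ k) → pvFI p a ks = pvFM p a ks := by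
  intro ks
  induction ks with
  | nil => intro a _ _; rfl
  | cons k ks ih =>
    intro a hs hle
    have hak : a ≤ k := hle k (by simp)
    by_cases hp : p k
    · simp only [pvFI, pvFM, List.foldl_cons, hp, if_true]
      rw [show max a k = k by omega]
      exact ih k hs.of_cons (fun x hx => (List.pairwise_cons.mp hs).1 x hx)
    · simp only [pvFI, pvFM, List.foldl_cons, hp, Bool.false_eq_true, if_false]
      exact ih a hs.of_cons (fun x hx => hle x (by simp [hx]))

theorem pvStepCell_eq_FM (c : Int) (i j : Nat) (a v : Int) :
    pvStepCell c i j a v = pvFM (fun k => decide (pvBase c i j + k = v)) a pvKs := by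
  rw [pvFM_single]
  have : (v - pvBase c i j) ∈ pvKs ↔ 0 ≤ v - pvBase c i j ∧ v - pvBase c i j < 10 := by
    simp [pvKs]; omega
  unfold pvStepCell
  by_cases h : 0 ≤ v - pvBase c i j ∧ v - pvBase c i j < 10 <;> simp [h, this.symm] at * <;> simp [h, this]

theorem pvFB_eq_FM (c : Int) (i j : Nat) : ∀ (l : List Int) (a : Int),
    pvFB c i j a l = pvFM (fun k => decide (pvBase c i j + k ∈ l)) a pvKs := by
  intro l
  induction l with
  | nil =>
    intro a
    simp only [pvFB, List.foldl_nil]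
    exact (pvFM_false (by simp)).symm
  | cons v l ih =>
    intro a
    have : pvFB c i j a (v :: l) = pvFB c i j (pvStepCell c i j a v) l := rfl
    rw [this, ih, pvStepCell_eq_FM, ← pvFM_merge]
    exact pvFM_congr (fun k => by simp [List.mem_cons, Bool.or_comm]) a pvKs

theorem pvAltStep_tab (v : Int) (f g : Nat → Nat → Int) :
    pvAltStep (pvTab f, pvTab g) v =
      (pvTab fun i j => pvStepCell (2*10) i j (f i j) v,
       pvTab fun i j => pvStepCell (3*10) i j (g i j) v) := by
  have e40 : PySem.Int.floordiv (v - 1) (4*10) = (v - 1) / 40 :=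
    PySem.Int.floordiv_eq_ediv_of_pos (by norm_num)
  have m40 : PySem.Int.mod (v - 1) (4*10) = (v - 1) % 40 :=
    PySem.Int.mod_eq_emod_of_pos (by norm_num)
  have e10 : PySem.Int.floordiv (PySem.Int.floordiv (v - 1) (4*10)) 10
      = ((v - 1) / 40) / 10 := by
    rw [e40]; exact PySem.Int.floordiv_eq_ediv_of_pos (by norm_num)
  have m10 : PySem.Int.mod (PySem.Int.floordiv (v - 1) (4*10)) 10
      = ((v - 1) / 40) % 10 := by
    rw [e40]; exact PySem.Int.mod_eq_emod_of_pos (by norm_num)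
  simp only [pvAltStep]
  by_cases hg : 0 ≤ PySem.Int.floordiv (PySem.Int.floordiv (v - 1) (4*10)) 10 ∧
      PySem.Int.floordiv (PySem.Int.floordiv (v - 1) (4*10)) 10 < 10
  · rw [if_pos hg]
    by_cases hA : 2*10 ≤ PySem.Int.mod (v - 1) (4*10) ∧ PySem.Int.mod (v - 1) (4*10) < 3*10
    · rw [if_pos hA,
        pvGetCell_tab f _ _ (by omega) (by omega),
        pvSetCell_tab f _ _ (by omega) (by omega)]
      simp only [Prod.mk.injEq]
      constructor
      · refine pvTab_congr (fun i j hi hj => ?_)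
        by_cases hc : i = (PySem.Int.floordiv (PySem.Int.floordiv (v - 1) (4*10)) 10).toNat ∧
            j = (PySem.Int.mod (PySem.Int.floordiv (v - 1) (4*10)) 10).toNat
        · obtain ⟨hc1, hc2⟩ := hc
          subst hc1; subst hc2
          simp only [pvStepCell, pvBase, and_self, ite_true]
          rw [if_pos (by omega)]
          congr 1
          omega
        · simp only [pvStepCell, pvBase, if_neg hc]
          rw [if_neg (by omega)]
      · refine pvTab_congr (fun i j hi hj => ?_)
        simp only [pvStepCell, pvBase]
        rw [if_neg (by omega)]
    · rw [if_neg hA]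
      by_cases hB : 3*10 ≤ PySem.Int.mod (v - 1) (4*10)
      · rw [if_pos hB,
          pvGetCell_tab g _ _ (by omega) (by omega),
          pvSetCell_tab g _ _ (by omega) (by omega)]
        simp only [Prod.mk.injEq]
        constructor
        · refine pvTab_congr (fun i j hi hj => ?_)
          simp only [pvStepCell, pvBase]
          rw [if_neg (by omega)]
        · refine pvTab_congr (fun i j hi hj => ?_)
          by_cases hc : i = (PySem.Int.floordiv (PySem.Int.floordiv (v - 1) (4*10)) 10).toNat ∧
              j = (PySem.Int.mod (PySem.Int.floordiv (v - 1) (4*10)) 10).toNat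
          · obtain ⟨hc1, hc2⟩ := hc
            subst hc1; subst hc2
            simp only [pvStepCell, pvBase, and_self, ite_true]
            rw [if_pos (by omega)]
            congr 1
            omega
          · simp only [pvStepCell, pvBase, if_neg hc]
            rw [if_neg (by omega)]
      · rw [if_neg hB]
        simp only [Prod.mk.injEq]
        refine ⟨pvTab_congr (fun i j hi hj => ?_), pvTab_congr (fun i j hi hj => ?_)⟩ <;>
          · simp only [pvStepCell, pvBase]
            rw [if_neg (by omega)]
  · rw [if_neg hg]
    simp only [Prod.mk.injEq]
    refine ⟨pvTab_congr (fun i j hi hj => ?_), pvTab_congr (fun i j hi hj => ?_)⟩ <;>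
      · simp only [pvStepCell, pvBase]
        rw [if_neg (by omega)]

theorem pvAlt_fold : ∀ (l : List Int) (f g : Nat → Nat → Int),
    l.foldl pvAltStep (pvTab f, pvTab g) =
      (pvTab fun i j => pvFB (2*10) i j (f i j) l,
       pvTab fun i j => pvFB (3*10) i j (g i j) l) := by
  intro l
  induction l with
  | nil => intro f g; rfl
  | cons v l ih =>
    intro f g
    rw [List.foldl_cons, pvAltStep_tab v f g, ih]
    rfl

theorem pvWrite_eq (l : List Int) (c : Int) (i0 j0 : Int) (hi : 0 ≤ i0 ∧ i0 < 10)
    (hj : 0 ≤ j0 ∧ j0 < 10) (k : Int) (f : Nat → Nat → Int)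
    (hm : 4*10*(i0*10+j0)+c+k+1 ∈ l) :
    pvSetCell (pvTab f) i0.toNat j0.toNat k =
      pvTab fun i j => if (i = i0.toNat ∧ j = j0.toNat) ∧ pvBase c i j + k ∈ l then k else f i j := by
  rw [pvSetCell_tab f _ _ (by omega) (by omega)]
  refine pvTab_congr (fun i j hi' hj' => ?_)
  by_cases hc : i = i0.toNat ∧ j = j0.toNat
  · obtain ⟨h4, h5⟩ := hc
    subst h4; subst h5
    have e : pvBase c i0.toNat j0.toNat + k = 4*10*(i0*10+j0)+c+k+1 := by
      unfold pvBase; omega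
    rw [if_pos ⟨rfl, rfl⟩, if_pos ⟨⟨rfl, rfl⟩, by rwa [e]⟩]
  · rw [if_neg hc, if_neg (fun hcon => hc hcon.1)]

theorem pvWrite_skip (l : List Int) (c : Int) (i0 j0 : Int) (hi : 0 ≤ i0 ∧ i0 < 10)
    (hj : 0 ≤ j0 ∧ j0 < 10) (k : Int) (f : Nat → Nat → Int)
    (hm : 4*10*(i0*10+j0)+c+k+1 ∉ l) :
    pvTab f =
      pvTab fun i j => if (i = i0.toNat ∧ j = j0.toNat) ∧ pvBase c i j + k ∈ l then k else f i j := by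
  refine pvTab_congr (fun i j hi' hj' => ?_)
  refine (if_neg (fun hcon => ?_)).symm
  obtain ⟨⟨h4, h5⟩, hmem⟩ := hcon
  subst h4; subst h5
  have e : pvBase c i0.toNat j0.toNat + k = 4*10*(i0*10+j0)+c+k+1 := by
    unfold pvBase; omega
  rw [e] at hmem
  exact hm hmem

theorem pvA_kstep (l : List Int) (i0 j0 : Int) (hi : 0 ≤ i0 ∧ i0 < 10) (hj : 0 ≤ j0 ∧ j0 < 10)
    (f g : Nat → Nat → Int) (k : Int) :
    pvAStep l i0 j0 (pvTab f, pvTab g) k =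
      (pvTab fun i j => if (i = i0.toNat ∧ j = j0.toNat) ∧ pvBase (2*10) i j + k ∈ l then k else f i j,
       pvTab fun i j => if (i = i0.toNat ∧ j = j0.toNat) ∧ pvBase (3*10) i j + k ∈ l then k else g i j) := by
  simp only [pvAStep]
  by_cases h2 : 4*10*(i0*10+j0)+2*10+k+1 ∈ l <;>
    by_cases h3 : 4*10*(i0*10+j0)+3*10+k+1 ∈ l <;>
    simp only [h2, h3, if_pos, if_neg, if_true, if_false, not_false_iff, Prod.mk.injEq]
  · exact ⟨pvWrite_eq l (2*10) i0 j0 hi hj k f h2, pvWrite_eq l (3*10) i0 j0 hi hj k g h3⟩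
  · exact ⟨pvWrite_eq l (2*10) i0 j0 hi hj k f h2, pvWrite_skip l (3*10) i0 j0 hi hj k g h3⟩
  · exact ⟨pvWrite_skip l (2*10) i0 j0 hi hj k f h2, pvWrite_eq l (3*10) i0 j0 hi hj k g h3⟩
  · exact ⟨pvWrite_skip l (2*10) i0 j0 hi hj k f h2, pvWrite_skip l (3*10) i0 j0 hi hj k g h3⟩

theorem pvA_kfold (l : List Int) (i0 j0 : Int) (hi : 0 ≤ i0 ∧ i0 < 10) (hj : 0 ≤ j0 ∧ j0 < 10) :
    ∀ (ks : List Int) (f g : Nat → Nat → Int),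
    ks.foldl (pvAStep l i0 j0) (pvTab f, pvTab g) =
      (pvTab fun i j => if i = i0.toNat ∧ j = j0.toNat then pvFI (fun k => decide (pvBase (2*10) i j + k ∈ l)) (f i j) ks else f i j,
       pvTab fun i j => if i = i0.toNat ∧ j = j0.toNat then pvFI (fun k => decide (pvBase (3*10) i j + k ∈ l)) (g i j) ks else g i j) := by
  intro ks
  induction ks with
  | nil =>
    intro f g
    simp only [List.foldl_nil, Prod.mk.injEq]
    constructor <;> exact pvTab_congr (fun i j _ _ => by
      by_cases hc : i = i0.toNat ∧ j = j0.toNat <;> simp [hc, pvFI])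
  | cons k ks ih =>
    intro f g
    rw [List.foldl_cons, pvA_kstep l i0 j0 hi hj f g k, ih]
    simp only [Prod.mk.injEq]
    constructor <;> refine pvTab_congr (fun i j hi' hj' => ?_) <;>
      · by_cases hc : i = i0.toNat ∧ j = j0.toNat
        · obtain ⟨h4, h5⟩ := hc
          subst h4; subst h5
          simp [pvFI]
        · simp [hc]

theorem pvA_jfold (l : List Int) (i0 : Int) (hi : 0 ≤ i0 ∧ i0 < 10) :
    ∀ (js : List Int), (∀ x ∈ js, 0 ≤ x ∧ x < 10) → js.Nodup →
    ∀ (f g : Nat → Nat → Int),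
    js.foldl (fun st j => pvKs.foldl (pvAStep l i0 j) st) (pvTab f, pvTab g) =
      (pvTab fun i j => if i = i0.toNat ∧ (j : Int) ∈ js then pvFI (fun k => decide (pvBase (2*10) i j + k ∈ l)) (f i j) pvKs else f i j,
       pvTab fun i j => if i = i0.toNat ∧ (j : Int) ∈ js then pvFI (fun k => decide (pvBase (3*10) i j + k ∈ l)) (g i j) pvKs else g i j) := by
  intro js
  induction js with
  | nil =>
    intro _ _ f g
    simp
  | cons j1 js ih =>
    intro hall hnd f g
    have hj1 : 0 ≤ j1 ∧ j1 < 10 := hall j1 (by simp)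
    rw [List.foldl_cons, pvA_kfold l i0 j1 hi hj1 pvKs f g,
      ih (fun x hx => hall x (by simp [hx])) hnd.of_cons]
    simp only [Prod.mk.injEq]
    constructor <;> refine pvTab_congr (fun i j hi' hj' => ?_) <;>
      · by_cases hii : i = i0.toNat
        · subst hii
          have hiff : ((j : Int) = j1) ↔ (j = j1.toNat) := by omega
          by_cases h2 : j = j1.toNat <;> by_cases h1 : (j : Int) ∈ js
          · exact absurd (hiff.mpr h2 ▸ h1) (List.nodup_cons.mp hnd).1
          · have e : max j1 0 = j1 := by omega
            have h1' : j1 ∉ js := fun hx => h1 (by rw [h2, show ((j1.toNat : Int)) = j1 by omega]; exact hx)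
            simp [h1', h2, List.mem_cons, e, hj1.1]
          · simp [h1, h2, List.mem_cons, hiff]
          · simp [h1, h2, List.mem_cons, hiff]
        · simp [hii]

theorem pvA_ifold (l : List Int) :
    ∀ (is : List Int), (∀ x ∈ is, 0 ≤ x ∧ x < 10) → is.Nodup →
    ∀ (f g : Nat → Nat → Int),
    is.foldl (fun st i => pvKs.foldl (fun st j => pvKs.foldl (pvAStep l i j) st) st) (pvTab f, pvTab g) =
      (pvTab fun i j => if (i : Int) ∈ is then pvFI (fun k => decide (pvBase (2*10) i j + k ∈ l)) (f i j) pvKs else f i j,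
       pvTab fun i j => if (i : Int) ∈ is then pvFI (fun k => decide (pvBase (3*10) i j + k ∈ l)) (g i j) pvKs else g i j) := by
  intro is
  induction is with
  | nil =>
    intro _ _ f g
    simp
  | cons i1 is ih =>
    intro hall hnd f g
    have hi1 : 0 ≤ i1 ∧ i1 < 10 := hall i1 (by simp)
    rw [List.foldl_cons, pvA_jfold l i1 hi1 pvKs (by decide) (by decide) f g,
      ih (fun x hx => hall x (by simp [hx])) hnd.of_cons]
    simp only [Prod.mk.injEq]
    constructor <;> refine pvTab_congr (fun i j hi' hj' => ?_) <;>
      · have hiff : ((i : Int) = i1) ↔ (i = i1.toNat) := by omega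
        have hjk : (j : Int) ∈ pvKs := by simp only [pvKs, List.mem_cons]; omega
        by_cases h2 : i = i1.toNat <;> by_cases h1 : (i : Int) ∈ is
        · exact absurd (hiff.mpr h2 ▸ h1) (List.nodup_cons.mp hnd).1
        · have e : max i1 0 = i1 := by omega
          have h1' : i1 ∉ is := fun hx => h1 (by rw [h2, show ((i1.toNat : Int)) = i1 by omega]; exact hx)
          simp [h1', h2, List.mem_cons, e, hi1.1, hjk]
        · simp [h1, h2, List.mem_cons, hiff, hjk]
        · simp [h1, h2, List.mem_cons, hiff, hjk]

theorem pvInitA : (PySem.List.pyRange 0 10 1).map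
      (fun _ => (PySem.List.pyRange 0 10 1).map (fun _ => (-1 : Int)))
    = pvTab (fun _ _ => -1) := by decide

theorem pvInitB : List.replicate 10 (List.replicate 10 (-1 : Int)) = pvTab (fun _ _ => -1) := by
  decide

theorem pvRng : PySem.List.pyRange 0 10 1 = pvKs := by decide

-- ===== VERDICT (by name: the statement is the Claim_ definition above) =====
theorem to_mols_spec : Claim_equal_to_mols := by
  intro l _
  show to_mols l = to_mols_alt l
  simp only [to_mols, to_mols_alt]
  rw [pvInitA, pvRng, pvInitB, pvAlt_fold l,
    pvA_ifold l pvKs (by decide) (by decide) (fun _ _ => -1) (fun _ _ => -1)]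
  simp only [Prod.mk.injEq]
  constructor <;> refine pvTab_congr (fun i j hi' hj' => ?_) <;>
    · rw [if_pos (show (i : Int) ∈ pvKs by simp [pvKs]; omega),
        pvFB_eq_FM, pvFI_eq_FM _ pvKs (-1) (by decide) (by decide)]
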